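-- pv_equiv track=rewrite | github.com/seonjaechoi0307/TIL | Study/Code_Test/School_Programers_Traning/2023-11-23.py | solution
-- ===== SOURCE A (Python) =====
-- def solution(n, control):
--
--     # 솔루션 정의
--     # 정수 n과 문자열 control이 주어집니다.
--     # control은 "w", "a", "s", "d"의 4개의 문자로 이루어져 있으며
--     # control의 앞에서부터 순서대로 문자에 따라 n의 값을 바꿉니다.
--
--     # 원소 계산 딕셔너리 정의
--     convert_dict = {
--         "w": 1,
--         "s": -1,
--         "d": 10,
--         "a": -10
--     }
--
--     # 계산
--     for i in control :
--         if i in convert_dict :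
--             n += convert_dict[i]
--
--     return n
-- ===== SOURCE B (Python) =====
-- def solution(n, control):
--     # Closed-form: one aggregate count per control character instead of a
--     # per-character loop with a dict lookup.
--     return (n
--             + control.count("w")
--             - control.count("s")
--             + 10 * control.count("d")
--             - 10 * control.count("a"))
-- ===== Notes on version B (the rewrite author's own statement) =====
-- stated objective: faster
-- what changed: Replaced the single accumulating loop with per-character dict lookups by a closed-form expression built from four aggregate str.count passes (n + #w - #s + 10*#d - 10*#a).
import Mathlib
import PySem

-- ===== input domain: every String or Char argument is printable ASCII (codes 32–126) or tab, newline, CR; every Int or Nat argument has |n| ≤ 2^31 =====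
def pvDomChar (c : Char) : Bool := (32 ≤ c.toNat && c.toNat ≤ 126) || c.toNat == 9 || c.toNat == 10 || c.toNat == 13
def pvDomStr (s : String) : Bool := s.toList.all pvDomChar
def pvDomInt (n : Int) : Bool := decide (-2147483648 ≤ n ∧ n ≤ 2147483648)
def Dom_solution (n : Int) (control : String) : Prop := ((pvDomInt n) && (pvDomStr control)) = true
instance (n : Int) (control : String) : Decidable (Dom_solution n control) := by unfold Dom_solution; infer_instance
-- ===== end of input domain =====

-- B replaces A's accumulating loop with per-character dict lookups by a closed-form
-- expression over four aggregate character counts (objective: faster, constant-factor; measured).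


-- ===== PORT A =====
-- the convert_dict literal of A (iterating a Python string yields 1-char strings; ported as Char)
def convertDict : PySem.Dict Char Int :=
  (((PySem.Dict.empty.insert 'w' 1).insert 's' (-1)).insert 'd' 10).insert 'a' (-10)

def solution (n : Int) (control : String) : Int :=
  control.toList.foldl
    (fun acc i => if convertDict.contains i then acc + convertDict.getD i 0 else acc) n

-- ===== PORT B =====
def solution_alt (n : Int) (control : String) : Int :=
  n + (PySem.Str.count control "w" : Int)
    - (PySem.Str.count control "s" : Int)
    + 10 * (PySem.Str.count control "d" : Int)
    - 10 * (PySem.Str.count control "a" : Int)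

-- ===== PRECONDITION & SPEC =====
def Spec_solution (n : Int) (control : String) (out : Int) : Prop := out = solution_alt n control
instance (n : Int) (control : String) (out : Int) : Decidable (Spec_solution n control out) := by unfold Spec_solution; infer_instance

-- ===== CLAIM (what is proved, stated in full; the proofs are below) =====
def Claim_equal_solution : Prop := ∀ (n : Int) (control : String), Dom_solution n control → Spec_solution n control (solution n control)

-- ===== LEMMAS AND PROOFS =====

-- PySem.Chars.count for a one-character pattern is List.count
theorem go_single (c : Char) : ∀ (cs : List Char) (fuel acc : Nat), cs.length ≤ fuel →
    PySem.Chars.count.go [c] fuel cs acc = acc + cs.count c := by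
  intro cs
  induction cs with
  | nil => intro fuel acc h; cases fuel <;> simp [PySem.Chars.count.go]
  | cons hd tl ih =>
    intro fuel acc h
    cases fuel with
    | zero => simp at h
    | succ f =>
      have hf : tl.length ≤ f := by simpa using h
      simp only [PySem.Chars.count.go, List.isPrefixOf, List.count_cons]
      by_cases hc : c = hd
      · subst hc
        simp [ih f (acc+1) hf]
        omega
      · simp [Ne.symm hc, hc, ih f acc hf]

theorem count_single (cs : List Char) (c : Char) : PySem.Chars.count cs [c] = cs.count c := by
  simp [PySem.Chars.count, go_single c cs cs.length 0 le_rfl]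

-- A's loop computes B's closed form
theorem loop_closed (cs : List Char) (n : Int) :
    cs.foldl (fun acc i => if convertDict.contains i then acc + convertDict.getD i 0 else acc) n
      = n + (cs.count 'w' : Int) - (cs.count 's' : Int)
          + 10 * (cs.count 'd' : Int) - 10 * (cs.count 'a' : Int) := by
  induction cs generalizing n with
  | nil => simp
  | cons hd tl ih =>
    simp only [List.foldl_cons, List.count_cons, ih]
    by_cases hw : hd = 'w'
    · subst hw
      have h1 : convertDict.contains 'w' = true := by decide
      have h2 : convertDict.getD 'w' 0 = 1 := by decide
      simp [h1, h2]; ring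
    · by_cases hs : hd = 's'
      · subst hs
        have h1 : convertDict.contains 's' = true := by decide
        have h2 : convertDict.getD 's' 0 = -1 := by decide
        simp [h1, h2]; ring
      · by_cases hd' : hd = 'd'
        · subst hd'
          have h1 : convertDict.contains 'd' = true := by decide
          have h2 : convertDict.getD 'd' 0 = 10 := by decide
          simp [h1, h2]; ring
        · by_cases ha : hd = 'a'
          · subst ha
            have h1 : convertDict.contains 'a' = true := by decide
            have h2 : convertDict.getD 'a' 0 = -10 := by decide
            simp [h1, h2]; ring
          · have e1 : ¬ ('w' = hd) := fun h => hw h.symm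
            have e2 : ¬ ('s' = hd) := fun h => hs h.symm
            have e3 : ¬ ('d' = hd) := fun h => hd' h.symm
            have e4 : ¬ ('a' = hd) := fun h => ha h.symm
            have hcf : convertDict.contains hd = false := by
              simp [convertDict, PySem.Dict.contains, PySem.Dict.insert, PySem.Dict.empty]
              exact ⟨e1, e2, e3, e4⟩
            simp [hcf, hw, hs, hd', ha]

-- ===== VERDICT (by name: the statement is the Claim_ definition above) =====
theorem solution_spec : Claim_equal_solution := by
  intro n control _
  unfold Spec_solution solution solution_alt
  simp only [PySem.Str.count_eq]
  have hw : ("w" : String).toList = ['w'] := rfl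
  have hs : ("s" : String).toList = ['s'] := rfl
  have hd : ("d" : String).toList = ['d'] := rfl
  have ha : ("a" : String).toList = ['a'] := rfl
  rw [hw, hs, hd, ha, count_single, count_single, count_single, count_single, loop_closed]
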